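-- pv_equiv track=rewrite | github.com/numpde/Team03 | project1/solution/aligner03/index/fm.py | build_tally
-- ===== SOURCE A (Python) =====
-- def build_tally(bw_transform, step=1):
--
--     S = [int(bw_transform[0] == '$')]
--     A = [int(bw_transform[0] == 'A')]
--     C = [int(bw_transform[0] == 'C')]
--     G = [int(bw_transform[0] == 'G')]
--     T = [int(bw_transform[0] == 'T')]
--
--     count_S = S[0]
--     count_A = A[0]
--     count_C = C[0]
--     count_G = G[0]
--     count_T = T[0]
--
--     for count, item in enumerate(bw_transform[1:], start=1):
--
--         count_S = count_S + int(item == '$')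
--         count_A = count_A + int(item == 'A')
--         count_C = count_C + int(item == 'C')
--         count_G = count_G + int(item == 'G')
--         count_T = count_T + int(item == 'T')
--
--         if count % step == 0:
--             S.append(count_S)
--             A.append(count_A)
--             C.append(count_C)
--             G.append(count_G)
--             T.append(count_T)
--
--     return {'$': S, 'A': A, 'C': C, 'G': G, 'T': T}
-- ===== SOURCE B (Python) =====
-- def build_tally(bw_transform, step=1):
--     n = len(bw_transform)
--     tally = {}
--     for sym in '$ACGT':
--         prefix = []
--         c = 0
--         for ch in bw_transform:
--             c += (ch == sym)
--             prefix.append(c)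
--         tally[sym] = [prefix[i] for i in range(n) if i == 0 or i % step == 0]
--     return tally
-- ===== Notes on version B (the rewrite author's own statement) =====
-- stated objective: alternative
-- what changed: B builds, for each of the five tally symbols, the full prefix-count array over the whole string in its own pass and then samples the step-divisible indices in a separate comprehension, instead of A's single streaming pass that conditionally appends to five parallel lists with a special-cased first element.
import Mathlib
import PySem

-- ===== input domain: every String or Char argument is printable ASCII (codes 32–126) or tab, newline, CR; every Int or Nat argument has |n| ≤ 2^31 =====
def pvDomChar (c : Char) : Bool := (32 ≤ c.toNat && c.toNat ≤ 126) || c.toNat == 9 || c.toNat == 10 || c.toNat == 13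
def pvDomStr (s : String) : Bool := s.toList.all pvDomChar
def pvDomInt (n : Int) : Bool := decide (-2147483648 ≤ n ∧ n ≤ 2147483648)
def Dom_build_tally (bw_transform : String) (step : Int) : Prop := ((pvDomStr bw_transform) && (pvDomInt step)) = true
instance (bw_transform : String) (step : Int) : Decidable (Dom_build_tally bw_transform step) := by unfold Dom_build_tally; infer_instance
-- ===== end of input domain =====

-- B recomputes the FM-index tally by per-symbol full prefix-count arrays sampled at step-divisible indices, instead of A's single streaming pass; same O(n) cost, different decomposition.
-- by per-symbol full prefix-count arrays sampled at step-divisible indices; same cost, different decomposition.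


-- ===== PORT A =====
-- one loop step of A's `for count, item in enumerate(bw_transform[1:], start=1)`
def pvAStep (step : Int)
    (st : (Int × Int × Int × Int × Int) × (List Int × List Int × List Int × List Int × List Int))
    (p : Int × Char) :
    (Int × Int × Int × Int × Int) × (List Int × List Int × List Int × List Int × List Int) :=
  let cS := st.1.1 + (if p.2 = '$' then 1 else 0)
  let cA := st.1.2.1 + (if p.2 = 'A' then 1 else 0)
  let cC := st.1.2.2.1 + (if p.2 = 'C' then 1 else 0)
  let cG := st.1.2.2.2.1 + (if p.2 = 'G' then 1 else 0)
  let cT := st.1.2.2.2.2 + (if p.2 = 'T' then 1 else 0)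
  if PySem.Int.mod p.1 step = 0 then
    ((cS, cA, cC, cG, cT),
     (st.2.1 ++ [cS], st.2.2.1 ++ [cA], st.2.2.2.1 ++ [cC], st.2.2.2.2.1 ++ [cG], st.2.2.2.2.2 ++ [cT]))
  else
    ((cS, cA, cC, cG, cT), st.2)

def build_tally (bw_transform : String) (step : Int) : List (String × List Int) :=
  match PySem.Str.pyGet? bw_transform 0 with
  | none => []  -- bw_transform[0] raises IndexError on the empty string; excluded by Pre_
  | some c0 =>
    let S : List Int := [if c0 = '$' then 1 else 0]
    let A : List Int := [if c0 = 'A' then 1 else 0]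
    let C : List Int := [if c0 = 'C' then 1 else 0]
    let G : List Int := [if c0 = 'G' then 1 else 0]
    let T : List Int := [if c0 = 'T' then 1 else 0]
    let r := (PySem.List.enumerate (PySem.List.slice bw_transform.toList (some 1) none) 1).foldl
               (pvAStep step)
               ((PySem.List.pyGetD S 0 0, PySem.List.pyGetD A 0 0, PySem.List.pyGetD C 0 0,
                 PySem.List.pyGetD G 0 0, PySem.List.pyGetD T 0 0), (S, A, C, G, T))
    [("$", r.2.1), ("A", r.2.2.1), ("C", r.2.2.2.1), ("G", r.2.2.2.2.1), ("T", r.2.2.2.2.2)]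

-- ===== PORT B =====
def build_tally_alt (bw_transform : String) (step : Int) : List (String × List Int) :=
  let cs := bw_transform.toList
  let n : Int := (cs.length : Int)
  "$ACGT".toList.foldl (fun tally sym =>
    let pref := (cs.foldl (fun (st : Int × List Int) ch =>
        let c := st.1 + (if ch = sym then 1 else 0)
        (c, st.2 ++ [c])) (0, [])).2
    tally ++ [(String.ofList [sym],
      (PySem.List.pyRange 0 n 1).filterMap (fun i =>
        if i = 0 ∨ PySem.Int.mod i step = 0 then some (PySem.List.pyGetD pref i 0) else none))]) []

-- ===== PRECONDITION & SPEC =====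
-- Pre_ excludes exactly the inputs on which the Python A raises: the empty string (IndexError on
-- bw_transform[0]) and step == 0 with more than one character (ZeroDivisionError at `count % step`).
def Pre_build_tally (bw_transform : String) (step : Int) : Prop :=
  bw_transform ≠ "" ∧ (step ≠ 0 ∨ bw_transform.toList.length = 1)
instance (bw_transform : String) (step : Int) : Decidable (Pre_build_tally bw_transform step) := by
  unfold Pre_build_tally; infer_instance

def pvWitness_build_tally : String × Int := ("GAT$ACA", 2)

def Spec_build_tally (bw_transform : String) (step : Int) (out : List (String × List Int)) : Prop := out = build_tally_alt bw_transform step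
instance (bw_transform : String) (step : Int) (out : List (String × List Int)) : Decidable (Spec_build_tally bw_transform step out) := by unfold Spec_build_tally; infer_instance

-- ===== CLAIM (what is proved, stated in full; the proofs are below) =====
def Claim_equal_build_tally : Prop := ∀ (bw_transform : String) (step : Int), Dom_build_tally bw_transform step → Pre_build_tally bw_transform step → Spec_build_tally bw_transform step (build_tally bw_transform step)

-- ===== LEMMAS AND PROOFS =====

-- number of occurrences of `sym` (as an Int), the value A's counters and B's prefix sums track
def pvCnt (sym : Char) : List Char → Int
  | [] => 0
  | x :: xs => (if x = sym then 1 else 0) + pvCnt sym xs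

-- the tallies appended while scanning `xs` with running count `c`, positions numbered from `m`
def pvSamp (sym : Char) (step : Int) : List Char → Int → Int → List Int
  | [], _, _ => []
  | x :: xs, c, m =>
    (if PySem.Int.mod m step = 0 then [c + (if x = sym then 1 else 0)] else [])
      ++ pvSamp sym step xs (c + (if x = sym then 1 else 0)) (m + 1)

theorem pvA_loop (step : Int) (rest : List Char) : ∀ (m cS cA cC cG cT : Int)
    (S A C G T : List Int),
    (PySem.List.enumerate rest m).foldl (pvAStep step) ((cS, cA, cC, cG, cT), (S, A, C, G, T)) =
    ((cS + pvCnt '$' rest, cA + pvCnt 'A' rest, cC + pvCnt 'C' rest, cG + pvCnt 'G' rest,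
      cT + pvCnt 'T' rest),
     (S ++ pvSamp '$' step rest cS m, A ++ pvSamp 'A' step rest cA m,
      C ++ pvSamp 'C' step rest cC m, G ++ pvSamp 'G' step rest cG m,
      T ++ pvSamp 'T' step rest cT m)) := by
  induction rest with
  | nil => intro m cS cA cC cG cT S A C G T; simp [pvCnt, pvSamp]
  | cons x xs ih =>
    intro m cS cA cC cG cT S A C G T
    rw [PySem.List.enumerate_cons, List.foldl_cons, pvAStep]
    by_cases h : PySem.Int.mod m step = 0 <;>
      simp [h, ih, pvCnt, pvSamp, add_assoc, List.append_assoc]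

theorem pvB_prefix (sym : Char) (cs : List Char) : ∀ (c : Int) (acc : List Int),
    cs.foldl (fun (st : Int × List Int) ch =>
        (st.1 + (if ch = sym then 1 else 0), st.2 ++ [st.1 + (if ch = sym then 1 else 0)])) (c, acc) =
    (c + pvCnt sym cs,
     acc ++ (List.range cs.length).map (fun i => c + pvCnt sym (cs.take (i + 1)))) := by
  induction cs with
  | nil => intro c acc; simp [pvCnt]
  | cons x xs ih =>
    intro c acc
    rw [List.foldl_cons, ih]
    simp [List.range_succ_eq_map, pvCnt, List.map_map, Function.comp_def, add_assoc,
      List.append_assoc, Nat.succ_eq_add_one]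

theorem pvB_samp (sym : Char) (step : Int) (xs : List Char) : ∀ (c : Int) (m : Int), 1 ≤ m →
    (List.range xs.length).filterMap (fun (i : Nat) =>
        if PySem.Int.mod (m + (i : Int)) step = 0 then some (c + pvCnt sym (xs.take (i + 1)))
        else none) = pvSamp sym step xs c m := by
  induction xs with
  | nil => intro c m _; simp [pvSamp]
  | cons x xs ih =>
    intro c m hm
    rw [List.length_cons, List.range_succ_eq_map, List.filterMap_cons, List.filterMap_map]
    have htail : (List.filterMap ((fun (i : Nat) =>
        if PySem.Int.mod (m + (i : Int)) step = 0 then some (c + pvCnt sym ((x :: xs).take (i + 1)))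
        else none) ∘ Nat.succ) (List.range xs.length)) = pvSamp sym step xs (c + (if x = sym then 1 else 0)) (m + 1) := by
      rw [← ih (c + (if x = sym then 1 else 0)) (m + 1) (by omega)]
      apply List.filterMap_congr
      intro i _
      have h2 : m + ((i.succ : Nat) : Int) = (m + 1) + (i : Int) := by push_cast; ring
      simp only [Function.comp_def, h2, Nat.succ_eq_add_one, List.take_succ_cons, pvCnt, add_assoc]
    rw [htail]
    by_cases h : PySem.Int.mod m step = 0 <;>
      simp [pvSamp, h, pvCnt]

-- the per-symbol list B produces, rewritten to A's head ++ sampled-tail shape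
theorem pvKey (sym : Char) (step : Int) (c0 : Char) (rest : List Char) :
    (List.range (rest.length + 1)).filterMap (fun (i : Nat) =>
        if (i : Int) = 0 ∨ PySem.Int.mod (i : Int) step = 0 then
          some (pvCnt sym ((c0 :: rest).take (i + 1)))
        else none) =
    (if c0 = sym then 1 else 0) :: pvSamp sym step rest (if c0 = sym then 1 else 0) 1 := by
  rw [List.range_succ_eq_map, List.filterMap_cons, List.filterMap_map]
  have htail : (List.filterMap ((fun (i : Nat) =>
      if (i : Int) = 0 ∨ PySem.Int.mod (i : Int) step = 0 then
        some (pvCnt sym ((c0 :: rest).take (i + 1)))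
      else none) ∘ Nat.succ) (List.range rest.length)) =
      pvSamp sym step rest (if c0 = sym then 1 else 0) 1 := by
    rw [← pvB_samp sym step rest (if c0 = sym then 1 else 0) 1 (by omega)]
    apply List.filterMap_congr
    intro i _
    have h1 : ((i.succ : Nat) : Int) ≠ 0 := by positivity
    have h2 : ((i.succ : Nat) : Int) = 1 + (i : Int) := by push_cast; ring
    have h3 : ¬ ((1 : Int) + (i : Int) = 0) := by positivity
    simp only [Function.comp_def, h2, h3, false_or, Nat.succ_eq_add_one, List.take_succ_cons,
      pvCnt]
  rw [htail]
  simp [pvCnt]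

-- ===== VERDICT (by name: the statement is the Claim_ definition above) =====
theorem build_tally_spec : Claim_equal_build_tally := by
  intro bw step _ hpre
  obtain ⟨hne, _⟩ := hpre
  have hcs : bw.toList ≠ [] := fun h => hne (by cases bw; simp_all)
  obtain ⟨c0, rest, hrest⟩ := List.exists_cons_of_ne_nil hcs
  unfold Spec_build_tally build_tally build_tally_alt
  have hget : PySem.Str.pyGet? bw 0 = some c0 := by
    simp [PySem.Str.pyGet?, PySem.List.pyGet?, PySem.List.pyIdx?, hrest]
  rw [hget]
  simp only [hrest, PySem.List.slice_from_one, List.tail_cons, PySem.List.pyGetD_zero_cons,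
    pvA_loop, List.length_cons, PySem.List.pyRange_zero_nat, List.filterMap_map]
  have hsyms : "$ACGT".toList = ['$', 'A', 'C', 'G', 'T'] := rfl
  rw [hsyms]
  simp only [List.foldl_cons, List.foldl_nil, List.nil_append, pvB_prefix]
  have hfix : ∀ (sym : Char),
      (List.filterMap (fun (x : Nat) =>
        ((fun (x : Int) => if x = 0 ∨ PySem.Int.mod x step = 0 then
            some (PySem.List.pyGetD
              ([0 + if c0 = sym then 1 else 0] ++
                List.map (fun i => (0 + if c0 = sym then 1 else 0) + pvCnt sym (List.take (i + 1) rest))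
                  (List.range rest.length)) x 0)
          else none) ∘ fun (k : Nat) => (k : Int)) x)
        (List.range (rest.length + 1))) =
      (if c0 = sym then 1 else 0) :: pvSamp sym step rest (if c0 = sym then 1 else 0) 1 := by
    intro sym
    have hpref : ([0 + if c0 = sym then 1 else 0] ++
        List.map (fun i => (0 + if c0 = sym then 1 else 0) + pvCnt sym (List.take (i + 1) rest))
          (List.range rest.length)) =
        List.map (fun i => 0 + pvCnt sym (List.take (i + 1) (c0 :: rest))) (List.range (rest.length + 1)) := by
      rw [List.range_succ_eq_map, List.map_cons, List.map_map]
      simp [Function.comp_def, pvCnt, List.take_succ_cons]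
    rw [hpref, ← pvKey sym step c0 rest]
    apply List.filterMap_congr
    intro i hi
    simp only [Function.comp_def, PySem.List.pyGetD_natCast,
      PySem.List.getD_map_range _ _ _ _ (List.mem_range.mp hi), zero_add]
  simp only [hfix]
  rfl
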